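-- pv_equiv track=rewrite | github.com/farcenterextremist/Out-of-route-buddy | scripts/coordinator-email/context_loader.py | _truncate_at_boundary
-- ===== SOURCE A (Python) =====
-- TRUNCATE_SUFFIX = "\n\n[... truncated ...]"
--
-- def _truncate_at_boundary(text: str, max_chars: int) -> str:
--     """
--     Truncate text at a natural boundary (newline, period, space) to avoid cutting mid-word.
--     Leaves room for TRUNCATE_SUFFIX. Returns text unchanged if len(text) <= max_chars.
--     """
--     if not text or len(text) <= max_chars:
--         return text
--     reserve = len(TRUNCATE_SUFFIX) + 5
--     cut_at = max_chars - reserve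
--     if cut_at <= 0:
--         return text[:max_chars] + TRUNCATE_SUFFIX
--     # Prefer: newline > period+space > space
--     for sep in ("\n", ". ", " "):
--         pos = text.rfind(sep, 0, cut_at + 1)
--         if pos > 0:
--             return text[: pos + len(sep)].rstrip() + TRUNCATE_SUFFIX
--     return text[:cut_at].rstrip() + TRUNCATE_SUFFIX
-- ===== SOURCE B (Python) =====
-- TRUNCATE_SUFFIX = "\n\n[... truncated ...]"
--
-- def _truncate_at_boundary(text: str, max_chars: int) -> str:
--     """Single forward scan over the search window tracking the last newline,
--     '. ' pair and space, instead of three backward rfind passes."""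
--     if not text or len(text) <= max_chars:
--         return text
--     reserve = len(TRUNCATE_SUFFIX) + 5
--     cut_at = max_chars - reserve
--     if cut_at <= 0:
--         return text[:max_chars] + TRUNCATE_SUFFIX
--     last_nl = last_ps = last_sp = -1
--     prev = ""
--     for i, ch in enumerate(text[: cut_at + 1]):
--         if ch == "\n":
--             last_nl = i
--         elif ch == " ":
--             last_sp = i
--             if prev == ".":
--                 last_ps = i - 1
--         prev = ch
--     if last_nl > 0:
--         return text[: last_nl + 1].rstrip() + TRUNCATE_SUFFIX
--     if last_ps > 0:
--         return text[: last_ps + 2].rstrip() + TRUNCATE_SUFFIX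
--     if last_sp > 0:
--         return text[: last_sp + 1].rstrip() + TRUNCATE_SUFFIX
--     return text[:cut_at].rstrip() + TRUNCATE_SUFFIX
-- ===== Notes on version B (the rewrite author's own statement) =====
-- stated objective: alternative
-- what changed: A does up to three backward rfind passes over the window (one per separator); B makes a single forward pass over the window tracking the last newline, '. ' pair and space seen, then applies the same priority.
import Mathlib
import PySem

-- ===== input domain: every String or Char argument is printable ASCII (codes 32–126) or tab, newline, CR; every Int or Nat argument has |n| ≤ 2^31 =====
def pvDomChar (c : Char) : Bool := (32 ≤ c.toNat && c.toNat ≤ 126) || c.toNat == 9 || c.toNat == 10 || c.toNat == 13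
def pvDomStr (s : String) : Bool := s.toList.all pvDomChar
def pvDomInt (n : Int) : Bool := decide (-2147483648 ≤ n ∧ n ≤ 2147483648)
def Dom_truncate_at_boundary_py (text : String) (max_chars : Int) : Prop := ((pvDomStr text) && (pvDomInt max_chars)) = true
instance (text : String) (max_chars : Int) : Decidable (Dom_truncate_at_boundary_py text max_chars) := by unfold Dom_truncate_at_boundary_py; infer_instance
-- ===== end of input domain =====

-- B replaces A's three backward rfind passes over the search window by one forward scan
-- that tracks the last newline / ". " pair / space seen (objective: alternative, same cost).

def pvSuffix : String := "\n\n[... truncated ...]"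

-- ===== PORT A =====
-- A's 'for sep in ("\n", ". ", " ")' loop with its early return
def tabA_loop (text : String) (cut_at : Int) : List String → String
  | [] => PySem.Str.rstrip (PySem.Str.slice text none (some cut_at)) ++ pvSuffix
  | sep :: rest =>
      let pos := PySem.Str.rfindFrom text sep 0 (some (cut_at + 1))
      if pos > 0 then
        PySem.Str.rstrip (PySem.Str.slice text none (some (pos + PySem.Str.len sep))) ++ pvSuffix
      else tabA_loop text cut_at rest

def truncate_at_boundary_py (text : String) (max_chars : Int) : String :=
  if text = "" ∨ PySem.Str.len text ≤ max_chars then text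
  else
    let reserve := PySem.Str.len pvSuffix + 5
    let cut_at := max_chars - reserve
    if cut_at ≤ 0 then PySem.Str.slice text none (some max_chars) ++ pvSuffix
    else tabA_loop text cut_at ["\n", ". ", " "]

-- ===== PORT B =====
-- one step of B's forward scan; state = (last_nl, last_ps, last_sp, prev char)
def tabB_step (acc : Int × Int × Int × Option Char) (p : Int × Char) : Int × Int × Int × Option Char :=
  let (nl, ps, sp, prev) := acc
  let (i, ch) := p
  if ch = '\n' then (i, ps, sp, some ch)
  else if ch = ' ' then (nl, if prev = some '.' then i - 1 else ps, i, some ch)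
  else (nl, ps, sp, some ch)

def truncate_at_boundary_py_alt (text : String) (max_chars : Int) : String :=
  if text = "" ∨ PySem.Str.len text ≤ max_chars then text
  else
    let reserve := PySem.Str.len pvSuffix + 5
    let cut_at := max_chars - reserve
    if cut_at ≤ 0 then PySem.Str.slice text none (some max_chars) ++ pvSuffix
    else
      let window := PySem.Str.slice text none (some (cut_at + 1))
      let st := (PySem.List.enumerate window.toList 0).foldl tabB_step (-1, -1, -1, none)
      if st.1 > 0 then PySem.Str.rstrip (PySem.Str.slice text none (some (st.1 + 1))) ++ pvSuffix
      else if st.2.1 > 0 then PySem.Str.rstrip (PySem.Str.slice text none (some (st.2.1 + 2))) ++ pvSuffix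
      else if st.2.2.1 > 0 then PySem.Str.rstrip (PySem.Str.slice text none (some (st.2.2.1 + 1))) ++ pvSuffix
      else PySem.Str.rstrip (PySem.Str.slice text none (some cut_at)) ++ pvSuffix

-- ===== PRECONDITION & SPEC =====
def Spec_truncate_at_boundary_py (text : String) (max_chars : Int) (out : String) : Prop := out = truncate_at_boundary_py_alt text max_chars
instance (text : String) (max_chars : Int) (out : String) : Decidable (Spec_truncate_at_boundary_py text max_chars out) := by unfold Spec_truncate_at_boundary_py; infer_instance

-- ===== CLAIM (what is proved, stated in full; the proofs are below) =====
def Claim_equal_truncate_at_boundary_py : Prop := ∀ (text : String) (max_chars : Int), Dom_truncate_at_boundary_py text max_chars → Spec_truncate_at_boundary_py text max_chars (truncate_at_boundary_py text max_chars)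

-- ===== LEMMAS AND PROOFS =====

lemma go_zero (s sub : List Char) :
    PySem.Chars.rfind.go s sub 0 = if sub.isPrefixOf s then 0 else -1 := rfl

lemma go_succ (s sub : List Char) (j : Nat) :
    PySem.Chars.rfind.go s sub (j + 1) =
      if sub.isPrefixOf (s.drop (j + 1)) then ((j : Int) + 1) else PySem.Chars.rfind.go s sub j := rfl

lemma rfind_eq_go (s sub : List Char) : PySem.Chars.rfind s sub = PySem.Chars.rfind.go s sub s.length := rfl

lemma go_congr (s s' sub sub' : List Char) (k : Nat)
    (h : ∀ j ≤ k, sub.isPrefixOf (s.drop j) = sub'.isPrefixOf (s'.drop j)) :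
    PySem.Chars.rfind.go s sub k = PySem.Chars.rfind.go s' sub' k := by
  induction k with
  | zero =>
      have h0 := h 0 (Nat.le_refl 0)
      simp only [List.drop_zero] at h0
      rw [go_zero, go_zero, h0]
  | succ k ih =>
      rw [go_succ, go_succ, h (k + 1) (Nat.le_refl _)]
      split
      · rfl
      · exact ih (fun j hj => h j (Nat.le_succ_of_le hj))

lemma isPrefixOf_append_single (p l : List Char) (x : Char) (h : p.length ≤ l.length) :
    p.isPrefixOf (l ++ [x]) = p.isPrefixOf l := by
  apply Bool.eq_iff_iff.mpr
  rw [List.isPrefixOf_iff_prefix, List.isPrefixOf_iff_prefix]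
  constructor
  · intro hp
    have := List.prefix_iff_eq_take.mp hp
    rw [List.take_append_of_le_length h] at this
    exact this ▸ List.take_prefix _ _
  · exact fun hp => hp.trans (List.prefix_append _ _)

lemma rfind_append_single (w : List Char) (x c : Char) :
    PySem.Chars.rfind (w ++ [x]) [c] = if x = c then (w.length : Int) else PySem.Chars.rfind w [c] := by
  rw [rfind_eq_go, List.length_append, List.length_singleton, go_succ]
  have hdrop : (w ++ [x]).drop (w.length + 1) = [] := by
    apply List.drop_eq_nil_of_le; simp
  rw [hdrop]
  simp only [List.isPrefixOf, Bool.false_eq_true, if_false]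
  cases w with
  | nil =>
      rw [List.nil_append, List.length_nil, go_zero, rfind_eq_go, List.length_nil, go_zero]
      by_cases hxc : x = c
      · subst hxc; simp [List.isPrefixOf]
      · have h1 : [c].isPrefixOf [x] = false := by
          simp [List.isPrefixOf]; exact fun h => hxc h.symm
        have h2 : [c].isPrefixOf ([] : List Char) = false := by simp [List.isPrefixOf]
        rw [h1, h2]; simp [hxc]
  | cons a t =>
      have hlen : (a :: t).length = t.length + 1 := rfl
      rw [hlen, go_succ]
      have hdrop2 : ((a :: t) ++ [x]).drop (t.length + 1) = [x] := by
        have h0 : ((a :: t) ++ [x]).drop (a :: t).length = [x] := List.drop_left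
        simpa [hlen] using h0
      rw [hdrop2]
      by_cases hxc : x = c
      · subst hxc; simp [List.isPrefixOf, hlen]
      · have hpre : [c].isPrefixOf [x] = false := by
          simp [List.isPrefixOf]; exact fun h => hxc h.symm
        rw [hpre]
        simp only [Bool.false_eq_true, if_false, if_neg hxc]
        rw [rfind_eq_go, hlen, go_succ]
        have hdrop3 : (a :: t).drop (t.length + 1) = [] := by
          apply List.drop_eq_nil_of_le; simp [hlen]
        rw [hdrop3]
        simp only [List.isPrefixOf, Bool.false_eq_true, if_false]
        apply go_congr
        intro j hj
        have hj' : j ≤ (a :: t).length := by simp [hlen]; omega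
        rw [List.drop_append_of_le_length hj']
        apply isPrefixOf_append_single
        simp [hlen]; omega

lemma go_hit (s sub : List Char) (k : Nat) (h : sub.isPrefixOf (s.drop k) = true) :
    PySem.Chars.rfind.go s sub k = (k : Int) := by
  cases k with
  | zero => rw [go_zero]; simp only [List.drop_zero] at h; rw [h]; rfl
  | succ j => rw [go_succ, h]; simp

lemma go_miss (s sub : List Char) (j : Nat) (h : sub.isPrefixOf (s.drop (j + 1)) = false) :
    PySem.Chars.rfind.go s sub (j + 1) = PySem.Chars.rfind.go s sub j := by
  rw [go_succ, h]; simp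

lemma isPrefixOf_pair_single (a b y : Char) : [a, b].isPrefixOf [y] = false := by
  simp [List.isPrefixOf]

lemma rfind_append_pair (w : List Char) (x : Char) :
    PySem.Chars.rfind (w ++ [x]) ['.', ' '] =
      if x = ' ' ∧ w.getLast? = some '.' then (w.length : Int) - 1
      else PySem.Chars.rfind w ['.', ' '] := by
  cases w using List.reverseRecOn with
  | nil =>
      rw [List.nil_append, List.getLast?_nil, rfind_eq_go, List.length_singleton,
          go_miss _ _ _ (by rfl), go_zero, isPrefixOf_pair_single]
      simp [rfind_eq_go, go_zero, List.isPrefixOf]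
  | append_singleton w' a =>
      rw [List.getLast?_concat]
      have hlen : (w' ++ [a]).length = w'.length + 1 := by simp
      have hassoc : (w' ++ [a]) ++ [x] = w' ++ ([a] ++ [x]) := by simp
      rw [rfind_eq_go, List.append_assoc, List.length_append, List.length_append]
      simp only [List.length_singleton]
      rw [show w'.length + (1 + 1) = (w'.length + 1) + 1 by omega]
      have hd1 : (w' ++ ([a] ++ [x])).drop (w'.length + 1 + 1) = [] := by
        apply List.drop_eq_nil_of_le; simp
      have hd2 : (w' ++ ([a] ++ [x])).drop (w'.length + 1) = [x] := by
        have h1 : ((w' ++ [a]) ++ [x]).drop ((w' ++ [a]).length) = [x] := List.drop_left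
        rw [hassoc, hlen] at h1; exact h1
      have hd3 : (w' ++ ([a] ++ [x])).drop w'.length = [a, x] := by
        have h1 : (w' ++ ([a] ++ [x])).drop w'.length = [a] ++ [x] := List.drop_left
        simpa using h1
      rw [go_miss _ _ _ (by rw [hd1]; rfl),
          go_miss _ _ _ (by rw [hd2]; exact isPrefixOf_pair_single _ _ _)]
      by_cases hax : x = ' ' ∧ a = '.'
      · obtain ⟨hx, ha⟩ := hax
        subst hx; subst ha
        rw [go_hit _ _ _ (by rw [hd3]; rfl)]
        simp [hlen]
      · have hpre : ['.', ' '].isPrefixOf [a, x] = false := by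
          cases hq : ['.', ' '].isPrefixOf [a, x] with
          | false => rfl
          | true =>
              exfalso
              rw [List.isPrefixOf_iff_prefix] at hq
              rcases hq with ⟨t, ht⟩
              cases t with
              | nil => simp at ht; exact hax ⟨ht.2.symm, ht.1.symm⟩
              | cons y ys => simp at ht
        have hneg : ¬ (x = ' ' ∧ (some a : Option Char) = some '.') := by
          intro h; exact hax ⟨h.1, Option.some.inj h.2⟩
        rw [if_neg hneg, rfind_eq_go, hlen,
            go_miss _ _ _ (by rw [show (w' ++ [a]).drop (w'.length + 1) = [] by
              apply List.drop_eq_nil_of_le; simp]; rfl)]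
        apply go_congr
        intro j hj
        rcases Nat.lt_or_ge j w'.length with hjw | hjw
        · have hj2 : j ≤ (w' ++ [a]).length := by simp; omega
          rw [← hassoc, List.drop_append_of_le_length hj2]
          apply isPrefixOf_append_single
          simp; omega
        · have hj' : j = w'.length := by omega
          subst hj'
          rw [hd3, List.drop_left, hpre, isPrefixOf_pair_single]

lemma enumerate_single (x : Char) (s : Int) : PySem.List.enumerate [x] s = [(s, x)] := rfl

lemma scan_eq (w : List Char) :
    (PySem.List.enumerate w 0).foldl tabB_step (-1, -1, -1, none) =
      (PySem.Chars.rfind w ['\n'], PySem.Chars.rfind w ['.', ' '],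
       PySem.Chars.rfind w [' '], w.getLast?) := by
  induction w using List.reverseRecOn with
  | nil => rfl
  | append_singleton w x ih =>
      rw [PySem.List.enumerate_append, List.foldl_append, ih, enumerate_single]
      simp only [List.foldl_cons, List.foldl_nil]
      rw [rfind_append_single, rfind_append_pair, rfind_append_single, List.getLast?_concat]
      unfold tabB_step
      simp only [zero_add]
      by_cases h1 : x = '\n'
      · subst h1; simp
      · by_cases h2 : x = ' '
        · subst h2
          simp only [if_neg (by decide : ¬ (' ' = '\n')), if_pos rfl]
          by_cases h3 : w.getLast? = some '.'
          · simp [h3]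
          · simp [h3]
        · simp [h1, h2]

lemma rfindFrom_window (s sub : List Char) (c : Int) (hc : 0 < c) (hs : s ≠ []) :
    PySem.Chars.rfindFrom s sub 0 (some (c + 1)) =
      PySem.Chars.rfind (s.take (c + 1).toNat) sub := by
  have hlen : 0 < s.length := List.length_pos_of_ne_nil hs
  unfold PySem.Chars.rfindFrom
  dsimp only
  by_cases hbig : (s.length : Int) < c + 1
  · have htake : s.take (c + 1).toNat = s := by
      apply List.take_of_length_le; omega
    rw [htake]
    rw [if_pos hbig, if_neg (by omega : ¬ (0:Int) < 0), if_neg (by omega : ¬ (s.length : Int) < 0)]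
    simp only [Int.toNat_zero, List.drop_zero, Int.toNat_natCast, List.take_length]
    split <;> omega
  · rw [if_neg hbig, if_neg (by omega : ¬ c + 1 < 0), if_neg (by omega : ¬ (0:Int) < 0)]
    rw [if_neg (by omega : ¬ c + 1 < (0:Int))]
    simp only [Int.toNat_zero, List.drop_zero]
    split <;> omega

-- ===== VERDICT (by name: the statement is the Claim_ definition above) =====
theorem truncate_at_boundary_py_spec : Claim_equal_truncate_at_boundary_py := by
  intro text max_chars _
  unfold Spec_truncate_at_boundary_py truncate_at_boundary_py truncate_at_boundary_py_alt
  by_cases h1 : text = "" ∨ PySem.Str.len text ≤ max_chars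
  · rw [if_pos h1, if_pos h1]
  · rw [if_neg h1, if_neg h1]
    push_neg at h1
    obtain ⟨hne, hlt⟩ := h1
    simp only
    by_cases h2 : max_chars - (PySem.Str.len pvSuffix + 5) ≤ 0
    · rw [if_pos h2, if_pos h2]
    · rw [if_neg h2, if_neg h2]
      set cut_at := max_chars - (PySem.Str.len pvSuffix + 5) with hcut
      have hc : 0 < cut_at := by omega
      have hsnil : text.toList ≠ [] := by
        intro h; apply hne
        cases text with | _ l => simp at h; simp [h]
      have hwin : (PySem.Str.slice text none (some (cut_at + 1))).toList
          = text.toList.take (cut_at + 1).toNat := by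
        rw [PySem.Str.toList_slice, PySem.Chars.slice_eq_listSlice,
            PySem.List.slice_to _ (by omega : (0:Int) ≤ cut_at + 1)]
      have hrf : ∀ sub : String, PySem.Str.rfindFrom text sub 0 (some (cut_at + 1))
          = PySem.Chars.rfind (text.toList.take (cut_at + 1).toNat) sub.toList := by
        intro sub
        rw [PySem.Str.rfindFrom_eq, rfindFrom_window _ _ _ hc hsnil]
      simp only [tabA_loop, hrf, hwin, scan_eq]
      rfl
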